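-- pv_equiv track=rewrite | github.com/crayxt/ecl_tokenizer | ecl_tokenizer.py | strip_complex_comment
-- ===== SOURCE A (Python) =====
-- def strip_complex_comment(line):
--     # Complex comments not having `--` and located after closing slash.
--     within_quote=False
--     for pos, char in enumerate(line):
--         if char == "'":
--             if not within_quote:
--                 within_quote = True
--             else:
--                 within_quote = False
--         elif char == "/":
--             if not within_quote:
--                 return line[0:pos+1]
--     return line
-- ===== SOURCE B (Python) =====
-- def strip_complex_comment(line):
--     # Split on apostrophes: even-indexed parts lie outside quotes, odd ones inside.
--     offset = 0
--     for i, part in enumerate(line.split("'")):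
--         if i % 2 == 0:
--             idx = part.find('/')
--             if idx != -1:
--                 return line[0:offset + idx + 1]
--         offset += len(part) + 1
--     return line
-- ===== Notes on version B (the rewrite author's own statement) =====
-- stated objective: faster
-- what changed: A scans character by character in Python with a within_quote boolean state machine; B splits the line on apostrophes once and searches only the even-indexed (outside-quote) segments for a slash via str.find, tracking a running offset to cut the original line, so the per-character work happens in C-level string primitives.
import Mathlib
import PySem

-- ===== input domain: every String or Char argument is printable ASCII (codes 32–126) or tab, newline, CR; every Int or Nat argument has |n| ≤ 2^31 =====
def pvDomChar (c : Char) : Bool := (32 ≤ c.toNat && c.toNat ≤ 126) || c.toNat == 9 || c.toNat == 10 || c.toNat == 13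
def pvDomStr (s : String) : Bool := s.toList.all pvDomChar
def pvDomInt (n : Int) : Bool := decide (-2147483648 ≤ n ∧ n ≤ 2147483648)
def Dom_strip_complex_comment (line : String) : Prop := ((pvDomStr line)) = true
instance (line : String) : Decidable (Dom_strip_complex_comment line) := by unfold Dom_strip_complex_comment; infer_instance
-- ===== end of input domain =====

-- B replaces A's per-character quote state machine by splitting the line at apostrophes and
-- scanning only the even-indexed (unquoted) segments for a slash (objective: faster, constant-factor — C-level split/find).

-- ===== PORT A =====
-- the character loop of A: position of the first '/' outside quotes, none if absent
def stripLoop : List Char → Nat → Bool → Option Nat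
  | [], _, _ => none
  | c :: cs, pos, within_quote =>
    if c = '\'' then
      stripLoop cs (pos + 1) (!within_quote)
    else if c = '/' then
      (if !within_quote then some pos else stripLoop cs (pos + 1) within_quote)
    else
      stripLoop cs (pos + 1) within_quote

def strip_complex_comment (line : String) : String :=
  match stripLoop line.toList 0 false with
  | some pos => PySem.Str.slice line (some 0) (some ((pos : Int) + 1))
  | none => line

-- ===== PORT B =====
-- the segment loop of B: i counts segments, offset is the index of the segment start in line
def altLoop (line : String) : List (List Char) → Nat → Nat → String
  | [], _, _ => line
  | part :: parts, i, offset =>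
    if i % 2 = 0 then
      (if PySem.Chars.find part ['/'] = -1 then
        altLoop line parts (i + 1) (offset + part.length + 1)
      else
        PySem.Str.slice line (some 0) (some ((offset : Int) + PySem.Chars.find part ['/'] + 1)))
    else
      altLoop line parts (i + 1) (offset + part.length + 1)

def strip_complex_comment_alt (line : String) : String :=
  altLoop line (line.toList.splitOn '\'') 0 0

-- ===== PRECONDITION & SPEC =====
def Spec_strip_complex_comment (line : String) (out : String) : Prop := out = strip_complex_comment_alt line
instance (line : String) (out : String) : Decidable (Spec_strip_complex_comment line out) := by unfold Spec_strip_complex_comment; infer_instance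

-- ===== CLAIM (what is proved, stated in full; the proofs are below) =====
def Claim_equal_strip_complex_comment : Prop := ∀ (line : String), Dom_strip_complex_comment line → Spec_strip_complex_comment line (strip_complex_comment line)

-- ===== LEMMAS AND PROOFS =====

theorem singleton_prefix_iff (d : Char) (l : List Char) : [d] <+: l ↔ ∃ t, l = d :: t := by
  cases l with
  | nil => simp
  | cons a t => simp [List.cons_prefix_cons, eq_comm]

theorem singleton_infix_cons (d c : Char) (p : List Char) :
    [d] <:+: (c :: p) ↔ c = d ∨ [d] <:+: p := by
  rw [List.infix_cons_iff]
  simp [List.cons_prefix_cons, eq_comm]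

-- find of a single character, cons step
theorem find_single_cons (c d : Char) (p : List Char) :
    PySem.Chars.find (c :: p) [d] =
      if c = d then 0
      else (if PySem.Chars.find p [d] = -1 then -1 else PySem.Chars.find p [d] + 1) := by
  by_cases hc : c = d
  · have hinf : [d] <:+: c :: p := (singleton_infix_cons d c p).2 (Or.inl hc)
    have h0 : 0 ≤ PySem.Chars.find (c :: p) [d] := (PySem.Chars.find_nonneg_iff _ _).2 hinf
    obtain ⟨hpre, hmin⟩ := PySem.Chars.find_spec h0
    have ht : (PySem.Chars.find (c :: p) [d]).toNat = 0 := by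
      by_contra hne
      exact hmin 0 (Nat.pos_of_ne_zero hne)
        ((singleton_prefix_iff d (List.drop 0 (c :: p))).2 ⟨p, by rw [List.drop_zero, hc]⟩)
    rw [if_pos hc]
    omega
  · by_cases hfp : PySem.Chars.find p [d] = -1
    · have : PySem.Chars.find (c :: p) [d] = -1 := by
        rw [PySem.Chars.find_eq_neg_one_iff]
        intro h
        rcases (singleton_infix_cons d c p).1 h with h1 | h1
        · exact hc h1
        · exact (PySem.Chars.find_eq_neg_one_iff p [d]).1 hfp h1
      simp [hc, hfp, this]
    · have h0p : 0 ≤ PySem.Chars.find p [d] := by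
        have := PySem.Chars.neg_one_le_find p [d]; omega
      obtain ⟨hpreP, hminP⟩ := PySem.Chars.find_spec h0p
      have hinf : [d] <:+: c :: p :=
        (singleton_infix_cons d c p).2 (Or.inr ((PySem.Chars.find_nonneg_iff _ _).1 h0p))
      have h0 : 0 ≤ PySem.Chars.find (c :: p) [d] := (PySem.Chars.find_nonneg_iff _ _).2 hinf
      obtain ⟨hpre, hmin⟩ := PySem.Chars.find_spec h0
      have hm0 : (PySem.Chars.find (c :: p) [d]).toNat ≠ 0 := by
        intro h
        rw [h] at hpre
        rcases (singleton_prefix_iff d (List.drop 0 (c :: p))).1 hpre with ⟨t, ht⟩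
        simp at ht
        exact hc ht.1
      obtain ⟨m, hm⟩ : ∃ m, (PySem.Chars.find (c :: p) [d]).toNat = m + 1 :=
        ⟨(PySem.Chars.find (c :: p) [d]).toNat - 1, by omega⟩
      have hdropm : [d] <+: List.drop m p := by
        have := hpre; rw [hm] at this; simpa [List.drop_succ_cons] using this
      have hk_le : (PySem.Chars.find p [d]).toNat ≤ m := by
        by_contra hlt
        exact hminP m (by omega) hdropm
      have hle : (PySem.Chars.find (c :: p) [d]).toNat ≤ (PySem.Chars.find p [d]).toNat + 1 := by
        by_contra hlt
        exact hmin ((PySem.Chars.find p [d]).toNat + 1) (by omega)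
          (by simpa [List.drop_succ_cons] using hpreP)
      simp only [if_neg hc, if_neg hfp]
      omega

theorem main_lemma (cs : List Char) (line : String) (i offset : Nat) (wq : Bool)
    (h : i % 2 = (if wq then 1 else 0)) :
    altLoop line (List.splitOnP (fun x => x == '\'') cs) i offset =
      (match stripLoop cs offset wq with
        | some pos => PySem.Str.slice line (some 0) (some ((pos : Int) + 1))
        | none => line) := by
  induction cs generalizing i offset wq with
  | nil =>
    have hfind : PySem.Chars.find ([] : List Char) ['/'] = -1 := by
      rw [PySem.Chars.find_eq_neg_one_iff]; simp
    simp only [List.splitOnP_nil, altLoop, stripLoop, hfind]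
    split_ifs <;> simp
  | cons c cs ih =>
    rw [List.splitOnP_cons]
    have hpar : (i + 1) % 2 = (if (!wq) then 1 else 0) := by
      cases wq <;> simp at h ⊢ <;> omega
    by_cases hc : c = '\''
    · subst hc
      have hfind : PySem.Chars.find ([] : List Char) ['/'] = -1 := by
        rw [PySem.Chars.find_eq_neg_one_iff]; simp
      have hstep : altLoop line ([] :: List.splitOnP (fun x => x == '\'') cs) i offset =
          altLoop line (List.splitOnP (fun x => x == '\'') cs) (i + 1) (offset + 1) := by
        simp only [altLoop, hfind, List.length_nil]
        split_ifs <;> rfl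
      rw [if_pos (by simp), hstep, ih (i + 1) (offset + 1) (!wq) hpar]
      simp [stripLoop]
    · obtain ⟨p, ps, hpp⟩ :=
        List.exists_cons_of_ne_nil (List.splitOnP_ne_nil (fun x => x == '\'') cs)
      rw [if_neg (by simp [hc]), hpp, List.modifyHead_cons]
      have ihx := ih i (offset + 1) wq h
      rw [hpp] at ihx
      cases wq with
      | false =>
        have hi : i % 2 = 0 := by simpa using h
        by_cases hc2 : c = '/'
        · subst hc2
          have hfind : PySem.Chars.find ('/' :: p) ['/'] = 0 := by
            rw [find_single_cons]; simp
          simp only [altLoop, hfind, if_pos hi, stripLoop, if_neg hc, if_pos rfl,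
            Bool.not_false]
          norm_num
        · have hstrip : stripLoop (c :: cs) offset false = stripLoop cs (offset + 1) false := by
            simp [stripLoop, hc, hc2]
          rw [hstrip, ← ihx]
          by_cases hfp : PySem.Chars.find p ['/'] = -1
          · have hfind : PySem.Chars.find (c :: p) ['/'] = -1 := by
              rw [find_single_cons]; simp [hc2, hfp]
            simp only [altLoop, hfind, if_pos hi, hfp, List.length_cons]
            have : offset + (p.length + 1) + 1 = offset + 1 + p.length + 1 := by omega
            rw [this]
            simp
          · have h0p : 0 ≤ PySem.Chars.find p ['/'] := by
              have := PySem.Chars.neg_one_le_find p ['/']; omega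
            have hfind : PySem.Chars.find (c :: p) ['/'] = PySem.Chars.find p ['/'] + 1 := by
              rw [find_single_cons]; simp [hc2, hfp]
            simp only [altLoop, hfind, if_pos hi, hfp, if_neg (by omega : ¬ (PySem.Chars.find p ['/'] + 1 = -1))]
            congr 2
            push_cast
            ring
      | true =>
        have hi : ¬ (i % 2 = 0) := by
          simp at h; omega
        have hstrip : stripLoop (c :: cs) offset true = stripLoop cs (offset + 1) true := by
          by_cases hc2 : c = '/' <;> simp [stripLoop, hc, hc2]
        rw [hstrip, ← ihx]
        simp only [altLoop, if_neg hi, List.length_cons]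
        congr 1
        omega

-- ===== VERDICT (by name: the statement is the Claim_ definition above) =====
theorem strip_complex_comment_spec : Claim_equal_strip_complex_comment := by
  intro line _
  unfold Spec_strip_complex_comment strip_complex_comment strip_complex_comment_alt
  rw [List.splitOn, main_lemma line.toList line 0 0 false (by norm_num)]
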